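-- pv_equiv track=rewrite | github.com/dahlkkim9-kgs/spark-sql-optimizer | backend/core/formatter_v5_sqlglot.py | _protect_backslash_strings
-- ===== SOURCE A (Python) =====
-- def _protect_backslash_strings(sql: str) -> tuple:
--     """保护含反斜杠的字符串字面量，防止 sqlglot 重复转义。
--
--     将 '\\\.' 这类含反斜杠的字符串替换为安全的占位符字符串，
--     sqlglot 不会对普通字符串字面量做二次转义。
--
--     Returns:
--         (protected_sql, string_map) — string_map: {placeholder: original_content}
--     """
--     string_map = {}
--     result = []
--     i = 0
--     in_str = False
--     qc = None
--     current = []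
--     counter = 0
--     in_line_comment = False
--     in_block_comment = False
--
--     while i < len(sql):
--         ch = sql[i]
--
--         if in_line_comment:
--             result.append(ch)
--             if ch == '\n':
--                 in_line_comment = False
--             i += 1
--             continue
--
--         if in_block_comment:
--             result.append(ch)
--             if ch == '*' and i + 1 < len(sql) and sql[i + 1] == '/':
--                 in_block_comment = False
--             i += 1
--             continue
--
--         if in_str:
--             current.append(ch)
--             if ch == '\\' and i + 1 < len(sql):
--                 current.append(sql[i + 1])
--                 i += 2
--                 continue
--             if ch == qc:
--                 content = ''.join(current)
--                 inner = content[1:-1]  # 去掉首尾引号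
--                 if '\\' in inner:
--                     placeholder = f'___BSTR{counter}___'
--                     string_map[placeholder] = inner
--                     result.append(qc + placeholder + qc)
--                     counter += 1
--                 else:
--                     result.append(content)
--                 in_str = False
--                 current = []
--             i += 1
--             continue
--
--         if ch in ("'", '"'):
--             in_str = True
--             qc = ch
--             current = [ch]
--             i += 1
--             continue
--
--         if ch == '-' and i + 1 < len(sql) and sql[i + 1] == '-':
--             in_line_comment = True
--             result.append(ch)
--             i += 1
--             continue
--
--         if ch == '/' and i + 1 < len(sql) and sql[i + 1] == '*':
--             in_block_comment = True
--             result.append(ch)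
--             i += 1
--             continue
--
--         result.append(ch)
--         i += 1
--
--     return ''.join(result), string_map
-- ===== SOURCE B (Python) =====
-- def _scan_string(sql, i):
--     """Return index just past the closing quote of the string opening at sql[i],
--     or None if the string is unterminated (a backslash escapes the next char)."""
--     qc = sql[i]
--     j = i + 1
--     while True:
--         cq = sql.find(qc, j)
--         if cq == -1:
--             return None
--         cb = sql.find('\\', j, cq)
--         if cb == -1:
--             return cq + 1
--         j = cb + 2
--
--
-- def _protect_backslash_strings(sql: str) -> tuple:
--     """Tokenizer: jump whole tokens (string / -- comment / /* comment) with str.find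
--     instead of walking char-by-char with mode flags."""
--     n = len(sql)
--     out = []
--     string_map = {}
--     counter = 0
--     i = 0
--     while i < n:
--         ch = sql[i]
--         if ch == "'" or ch == '"':
--             end = _scan_string(sql, i)
--             if end is None:
--                 break  # unterminated string literal: dropped from output
--             content = sql[i:end]
--             inner = content[1:-1]
--             if '\\' in inner:
--                 placeholder = f'___BSTR{counter}___'
--                 string_map[placeholder] = inner
--                 out.append(ch + placeholder + ch)
--                 counter += 1
--             else:
--                 out.append(content)
--             i = end
--         elif ch == '-' and sql.startswith('--', i):
--             k = sql.find('\n', i + 1)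
--             end = n if k == -1 else k + 1
--             out.append(sql[i:end])
--             i = end
--         elif ch == '/' and sql.startswith('/*', i):
--             k = sql.find('*/', i + 1)
--             end = n if k == -1 else k + 1  # keep the closing '*'; the '/' is re-scanned normally
--             out.append(sql[i:end])
--             i = end
--         else:
--             out.append(ch)
--             i += 1
--     return ''.join(out), string_map
-- ===== Notes on version B (the rewrite author's own statement) =====
-- stated objective: alternative
-- what changed: Replaced the char-by-char state machine with mode flags (in_str/in_line_comment/in_block_comment) by a tokenizer whose main loop dispatches on the token opener and consumes each string or comment token wholesale, locating its end by str.find jumps and slicing the token out.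
import Mathlib
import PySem

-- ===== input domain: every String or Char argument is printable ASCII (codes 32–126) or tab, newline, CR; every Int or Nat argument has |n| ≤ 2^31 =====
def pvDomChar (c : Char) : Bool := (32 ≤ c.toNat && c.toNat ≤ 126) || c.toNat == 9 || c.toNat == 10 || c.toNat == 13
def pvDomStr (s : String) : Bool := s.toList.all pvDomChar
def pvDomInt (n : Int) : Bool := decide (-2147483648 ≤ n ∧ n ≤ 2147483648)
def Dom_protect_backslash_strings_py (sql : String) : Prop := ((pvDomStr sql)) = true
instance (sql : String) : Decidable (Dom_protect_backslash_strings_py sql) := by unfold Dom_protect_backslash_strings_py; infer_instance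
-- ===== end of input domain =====

-- B replaces A's char-by-char flag state machine by a tokenizer that consumes each
-- string/comment token wholesale via find-style jumps (objective: alternative).


-- ===== PORT A =====
-- Transliteration of A's while-loop: index i over sql, mode flags in_line_comment /
-- in_block_comment / in_str, accumulators current / result kept as char lists
-- (Python appends string pieces to a list and joins them; accumulating the pieces'
-- characters is exact).  qc is Option Char (Python's None); counter stays the
-- nonnegative Python int, and Nat.repr renders f'{counter}' exactly for it.
-- fuel only encodes the loop's totality (each iteration advances i by at least 1,
-- so fuel = length + 1 never runs out); it changes nothing about the computation.
def protectA_loop (sql : List Char) (fuel : Nat) (i : Nat)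
    (inLine inBlock inStr : Bool) (qc : Option Char)
    (current : List Char) (counter : Nat)
    (result : List Char) (map : PySem.Dict String String) :
    List Char × PySem.Dict String String :=
  match fuel with
  | 0 => (result, map)
  | fuel + 1 =>
    if h : i < sql.length then
      let ch := sql[i]
      if inLine then
        protectA_loop sql fuel (i+1) (if ch = '\n' then false else true) inBlock inStr qc
          current counter (result ++ [ch]) map
      else if inBlock then
        protectA_loop sql fuel (i+1) inLine
          (if ch = '*' ∧ sql[i+1]? = some '/' then false else true) inStr qc
          current counter (result ++ [ch]) map
      else if inStr then
        if h2 : ch = '\\' ∧ i + 1 < sql.length then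
          protectA_loop sql fuel (i+2) inLine inBlock inStr qc
            (current ++ [ch, sql[i+1]'h2.2]) counter result map
        else if some ch = qc then
          let content := current ++ [ch]
          let inner := (content.drop 1).dropLast
          if '\\' ∈ inner then
            let ph := "___BSTR" ++ Nat.repr counter ++ "___"
            protectA_loop sql fuel (i+1) inLine inBlock false qc [] (counter+1)
              (result ++ [ch] ++ ph.toList ++ [ch])
              (PySem.Dict.insert map ph (String.ofList inner))
          else
            protectA_loop sql fuel (i+1) inLine inBlock false qc [] counter
              (result ++ content) map
        else
          protectA_loop sql fuel (i+1) inLine inBlock inStr qc (current ++ [ch]) counter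
            result map
      else if ch = '\'' ∨ ch = '"' then
        protectA_loop sql fuel (i+1) inLine inBlock true (some ch) [ch] counter result map
      else if ch = '-' ∧ sql[i+1]? = some '-' then
        protectA_loop sql fuel (i+1) true inBlock inStr qc current counter (result ++ [ch]) map
      else if ch = '/' ∧ sql[i+1]? = some '*' then
        protectA_loop sql fuel (i+1) inLine true inStr qc current counter (result ++ [ch]) map
      else
        protectA_loop sql fuel (i+1) inLine inBlock inStr qc current counter (result ++ [ch]) map
    else (result, map)

def protect_backslash_strings_py (sql : String) : String × (List (String × String)) :=
  let r := protectA_loop sql.toList (sql.toList.length + 1) 0 false false false none [] 0 [] PySem.Dict.empty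
  (String.ofList r.1, r.2.items)

-- ===== PORT B =====
-- sql[i:e] for the nonnegative, in-order slices B takes (exact there)
def seg (l : List Char) (i e : Nat) : List Char := (l.drop i).take (e - i)

-- decrease fact cited by the find helpers' termination proofs
def decStep1 {n i : Nat} (h : i < n) : n - (i+1) < n - i :=
  Nat.sub_lt_sub_left h (Nat.lt_succ_self i)

-- port of sql.find(c, j): first index ≥ j holding c (none = Python's -1)
def findFrom (l : List Char) (c : Char) (j : Nat) : Option Nat :=
  if h : j < l.length then
    if l[j] = c then some j else findFrom l c (j+1)
  else none
termination_by l.length - j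
decreasing_by exact decStep1 h

-- port of sql.find(c, j, hi): first index in [j, hi) holding c (B calls it with hi ≤ len)
def findFromTo (l : List Char) (c : Char) (j hi : Nat) : Option Nat :=
  if h : j < hi ∧ j < l.length then
    if l[j]'h.2 = c then some j else findFromTo l c (j+1) hi
  else none
termination_by hi - j
decreasing_by exact decStep1 h.1

-- port of sql.find('*/', j): first index k ≥ j with sql[k] = '*', sql[k+1] = '/'
def findPairFrom (l : List Char) (c1 c2 : Char) (j : Nat) : Option Nat :=
  if h : j + 1 < l.length then
    if l[j]'(Nat.lt_of_succ_lt h) = c1 ∧ l[j+1] = c2 then some j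
    else findPairFrom l c1 c2 (j+1)
  else none
termination_by l.length - j
decreasing_by exact decStep1 (Nat.lt_of_succ_lt h)

-- port of B's _scan_string loop: j jumps to cb+2 past each backslash escape
-- (fuel encodes totality: each round advances j by at least 2)
def stringEnd (sql : List Char) (qc : Char) (fuel : Nat) (j : Nat) : Option Nat :=
  match fuel with
  | 0 => none
  | fuel + 1 =>
    match findFrom sql qc j with
    | none => none
    | some cq =>
      match findFromTo sql '\\' j cq with
      | none => some (cq + 1)
      | some cb => stringEnd sql qc fuel (cb + 2)

-- port of B's main while-loop: dispatch on the token opener, consume tokens wholesale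
-- (fuel encodes totality: each round advances i by at least 1)
def emitLoop (sql : List Char) (fuel : Nat) (i : Nat) (out : List Char)
    (map : PySem.Dict String String) (counter : Nat) :
    List Char × PySem.Dict String String :=
  match fuel with
  | 0 => (out, map)
  | fuel + 1 =>
    if h : i < sql.length then
      let ch := sql[i]
      if ch = '\'' ∨ ch = '"' then
        match stringEnd sql ch (sql.length + 1) (i+1) with
        | none => (out, map)
        | some e =>
          let content := seg sql i e
          let inner := (content.drop 1).dropLast
          if '\\' ∈ inner then
            let ph := "___BSTR" ++ Nat.repr counter ++ "___"
            emitLoop sql fuel e (out ++ [ch] ++ ph.toList ++ [ch])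
              (PySem.Dict.insert map ph (String.ofList inner)) (counter+1)
          else
            emitLoop sql fuel e (out ++ content) map counter
      else if ch = '-' ∧ sql[i+1]? = some '-' then
        match findFrom sql '\n' (i+1) with
        | none => emitLoop sql fuel sql.length (out ++ seg sql i sql.length) map counter
        | some k => emitLoop sql fuel (k+1) (out ++ seg sql i (k+1)) map counter
      else if ch = '/' ∧ sql[i+1]? = some '*' then
        match findPairFrom sql '*' '/' (i+1) with
        | none => emitLoop sql fuel sql.length (out ++ seg sql i sql.length) map counter
        | some k => emitLoop sql fuel (k+1) (out ++ seg sql i (k+1)) map counter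
      else
        emitLoop sql fuel (i+1) (out ++ [sql[i]]) map counter
    else (out, map)

def protect_backslash_strings_py_alt (sql : String) : String × (List (String × String)) :=
  let r := emitLoop sql.toList (sql.toList.length + 1) 0 [] PySem.Dict.empty 0
  (String.ofList r.1, r.2.items)

-- ==== bounds / spec lemmas for the find helpers (unchanged) ====

-- ===== PRECONDITION & SPEC =====
def Spec_protect_backslash_strings_py (sql : String) (out : String × (List (String × String))) : Prop := out = protect_backslash_strings_py_alt sql
instance (sql : String) (out : String × (List (String × String))) : Decidable (Spec_protect_backslash_strings_py sql out) := by unfold Spec_protect_backslash_strings_py; infer_instance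

-- ===== CLAIM (what is proved, stated in full; the proofs are below) =====
def Claim_equal_protect_backslash_strings_py : Prop := ∀ (sql : String), Dom_protect_backslash_strings_py sql → Spec_protect_backslash_strings_py sql (protect_backslash_strings_py sql)

-- ===== LEMMAS AND PROOFS =====
theorem findFrom_bounds {l : List Char} {c : Char} {j k : Nat}
    (h : findFrom l c j = some k) : j ≤ k ∧ k < l.length := by
  fun_induction findFrom l c j with
  | case1 j h1 h2 => simp_all; omega
  | case2 j h1 h2 ih => have := ih h; omega
  | case3 j h1 => simp_all

theorem findFrom_spec {l : List Char} {c : Char} {j k : Nat}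
    (h : findFrom l c j = some k) :
    l[k]? = some c ∧ ∀ m, j ≤ m → m < k → l[m]? ≠ some c := by
  fun_induction findFrom l c j with
  | case1 j h1 h2 => subst h2; simp_all
  | case2 j h1 h2 ih =>
    obtain ⟨ha, hb⟩ := ih h
    refine ⟨ha, fun m hm1 hm2 => ?_⟩
    rcases Nat.eq_or_lt_of_le hm1 with rfl | hlt
    · simp [List.getElem?_eq_getElem h1, h2]
    · exact hb m hlt hm2
  | case3 j h1 => simp_all

theorem findFrom_eq_none_iff {l : List Char} {c : Char} {j : Nat} :
    findFrom l c j = none ↔ ∀ m, j ≤ m → l[m]? ≠ some c := by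
  fun_induction findFrom l c j with
  | case1 j h1 h2 =>
    simp only [reduceCtorEq, false_iff, not_forall]
    exact ⟨j, le_rfl, by simp [List.getElem?_eq_getElem h1, h2]⟩
  | case2 j h1 h2 ih =>
    rw [ih]
    constructor
    · intro h m hm
      rcases Nat.eq_or_lt_of_le hm with rfl | hlt
      · simp [List.getElem?_eq_getElem h1, h2]
      · exact h m hlt
    · intro h m hm; exact h m (by omega)
  | case3 j h1 =>
    simp only [true_iff]
    intro m hm hc
    obtain ⟨hlt, -⟩ := List.getElem?_eq_some_iff.mp hc
    omega

theorem findFromTo_bounds {l : List Char} {c : Char} {j hi k : Nat}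
    (h : findFromTo l c j hi = some k) : j ≤ k ∧ k < hi ∧ k < l.length := by
  fun_induction findFromTo l c j hi with
  | case1 j h1 h2 => simp_all; omega
  | case2 j h1 h2 ih => have := ih h; omega
  | case3 j h1 => simp_all

theorem findFromTo_spec {l : List Char} {c : Char} {j hi k : Nat}
    (h : findFromTo l c j hi = some k) :
    l[k]? = some c ∧ ∀ m, j ≤ m → m < k → l[m]? ≠ some c := by
  fun_induction findFromTo l c j hi with
  | case1 j h1 h2 => subst h2; simp_all
  | case2 j h1 h2 ih =>
    obtain ⟨ha, hb⟩ := ih h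
    refine ⟨ha, fun m hm1 hm2 => ?_⟩
    rcases Nat.eq_or_lt_of_le hm1 with rfl | hlt
    · simp [List.getElem?_eq_getElem h1.2, h2]
    · exact hb m hlt hm2
  | case3 j h1 => simp_all

theorem findFromTo_eq_none {l : List Char} {c : Char} {j hi : Nat}
    (h : findFromTo l c j hi = none) :
    ∀ m, j ≤ m → m < hi → l[m]? ≠ some c := by
  fun_induction findFromTo l c j hi with
  | case1 j h1 h2 => simp_all
  | case2 j h1 h2 ih =>
    intro m hm1 hm2
    rcases Nat.eq_or_lt_of_le hm1 with rfl | hlt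
    · simp [List.getElem?_eq_getElem h1.2, h2]
    · exact ih h m hlt hm2
  | case3 j h1 =>
    intro m hm1 hm2 hc
    obtain ⟨hlt, -⟩ := List.getElem?_eq_some_iff.mp hc
    rw [Classical.not_and_iff_not_or_not] at h1
    omega

theorem findPairFrom_bounds {l : List Char} {c1 c2 : Char} {j k : Nat}
    (h : findPairFrom l c1 c2 j = some k) : j ≤ k ∧ k + 1 < l.length := by
  fun_induction findPairFrom l c1 c2 j with
  | case1 j h1 h2 => simp_all; omega
  | case2 j h1 h2 ih => have := ih h; omega
  | case3 j h1 => simp_all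

-- ==== fuel irrelevance ====

theorem fuelIrrelS (sql : List Char) (qc : Char) :
    ∀ f g j, sql.length - j < f → sql.length - j < g →
    stringEnd sql qc f j = stringEnd sql qc g j := by
  intro f
  induction f with
  | zero => intro g j hf hg; omega
  | succ f ih =>
    intro g j hf hg
    obtain ⟨g1, rfl⟩ : ∃ g1, g = g1 + 1 := ⟨g - 1, by omega⟩
    cases hq : findFrom sql qc j with
    | none => simp [stringEnd, hq]
    | some cq =>
      cases hb : findFromTo sql '\\' j cq with
      | none => simp [stringEnd, hq, hb]
      | some cb =>
        have h1 := findFrom_bounds hq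
        have h2 := findFromTo_bounds hb
        simp only [stringEnd, hq, hb]
        exact ih g1 (cb+2) (by omega) (by omega)

theorem bumpS (sql : List Char) (qc : Char) {j : Nat} (hj : 0 < j) :
    stringEnd sql qc sql.length j = stringEnd sql qc (sql.length + 1) j := by
  rcases Nat.eq_zero_or_pos sql.length with h0 | hpos
  · rw [h0, stringEnd, stringEnd]
    have : findFrom sql qc j = none := by
      rw [findFrom]
      simp [h0]
    rw [this]
  · exact fuelIrrelS sql qc _ _ j (by omega) (by omega)

theorem fuelIrrelA (sql : List Char) :
    ∀ f g i inLine inBlock inStr qc current counter result map,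
    sql.length - i < f → sql.length - i < g →
    protectA_loop sql f i inLine inBlock inStr qc current counter result map =
    protectA_loop sql g i inLine inBlock inStr qc current counter result map := by
  intro f
  induction f with
  | zero => intro g i _ _ _ _ _ _ _ _ hf hg; omega
  | succ f ih =>
    intro g i inLine inBlock inStr qc current counter result map hf hg
    obtain ⟨g1, rfl⟩ : ∃ g1, g = g1 + 1 := ⟨g - 1, by omega⟩
    rw [protectA_loop, protectA_loop]
    by_cases h : i < sql.length
    · simp only [dif_pos h]
      split_ifs <;>
        exact ih g1 _ _ _ _ _ _ _ _ _ (by omega) (by omega)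
    · simp only [dif_neg h]

theorem bumpA (sql : List Char) {i : Nat} (hi : 0 < i)
    (inLine inBlock inStr : Bool) (qc : Option Char) (current : List Char) (counter : Nat)
    (result : List Char) (map : PySem.Dict String String) :
    protectA_loop sql sql.length i inLine inBlock inStr qc current counter result map =
    protectA_loop sql (sql.length + 1) i inLine inBlock inStr qc current counter result map := by
  rcases Nat.eq_zero_or_pos sql.length with h0 | hpos
  · rw [h0, protectA_loop, protectA_loop]
    simp [h0]
  · exact fuelIrrelA sql _ _ i _ _ _ _ _ _ _ _ (by omega) (by omega)

-- stringEnd bounds (any fuel)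

theorem stringEnd_bounds {sql : List Char} {qc : Char} :
    ∀ {f j e}, stringEnd sql qc f j = some e → j < e ∧ e ≤ sql.length := by
  intro f
  induction f with
  | zero => intro j e h; rw [stringEnd] at h; exact absurd h (by simp)
  | succ f ih =>
    intro j e h
    cases hq : findFrom sql qc j with
    | none => rw [stringEnd] at h; simp [hq] at h
    | some cq =>
      have h1 := findFrom_bounds hq
      cases hb : findFromTo sql '\\' j cq with
      | none =>
        rw [stringEnd] at h
        simp [hq, hb] at h
        omega
      | some cb =>
        rw [stringEnd] at h
        simp only [hq, hb] at h
        have h2 := findFromTo_bounds hb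
        have := ih h
        omega

theorem fuelIrrelB (sql : List Char) :
    ∀ f g i out map counter,
    sql.length - i < f → sql.length - i < g →
    emitLoop sql f i out map counter = emitLoop sql g i out map counter := by
  intro f
  induction f with
  | zero => intro g i _ _ _ hf hg; omega
  | succ f ih =>
    intro g i out map counter hf hg
    obtain ⟨g1, rfl⟩ : ∃ g1, g = g1 + 1 := ⟨g - 1, by omega⟩
    rw [emitLoop, emitLoop]
    by_cases h : i < sql.length
    · simp only [dif_pos h]
      by_cases h1 : sql[i] = '\'' ∨ sql[i] = '"'
      · rw [if_pos h1, if_pos h1]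
        cases hse : stringEnd sql (sql[i]) (sql.length + 1) (i+1) with
        | none => rfl
        | some e =>
          have hb := stringEnd_bounds hse
          simp only
          split_ifs <;> exact ih g1 _ _ _ _ (by omega) (by omega)
      · rw [if_neg h1, if_neg h1]
        by_cases h2 : sql[i] = '-' ∧ sql[i+1]? = some '-'
        · rw [if_pos h2, if_pos h2]
          cases hk : findFrom sql '\n' (i+1) with
          | none => exact ih g1 _ _ _ _ (by omega) (by omega)
          | some k =>
            have hb := findFrom_bounds hk
            exact ih g1 _ _ _ _ (by omega) (by omega)
        · rw [if_neg h2, if_neg h2]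
          by_cases h3 : sql[i] = '/' ∧ sql[i+1]? = some '*'
          · rw [if_pos h3, if_pos h3]
            cases hk : findPairFrom sql '*' '/' (i+1) with
            | none => exact ih g1 _ _ _ _ (by omega) (by omega)
            | some k =>
              have hb := findPairFrom_bounds hk
              exact ih g1 _ _ _ _ (by omega) (by omega)
          · rw [if_neg h3, if_neg h3]
            exact ih g1 _ _ _ _ (by omega) (by omega)
    · simp only [dif_neg h]

theorem bumpB (sql : List Char) {i : Nat} (hi : 0 < i)
    (out : List Char) (map : PySem.Dict String String) (counter : Nat) :
    emitLoop sql sql.length i out map counter =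
    emitLoop sql (sql.length + 1) i out map counter := by
  rcases Nat.eq_zero_or_pos sql.length with h0 | hpos
  · rw [h0, emitLoop, emitLoop]
    simp [h0]
  · exact fuelIrrelB sql _ _ i _ _ _ (by omega) (by omega)

theorem seg_self (l : List Char) (i : Nat) : seg l i i = [] := by simp [seg]

theorem seg_cons {l : List Char} {i e : Nat} (h : i < l.length) (h2 : i < e) :
    seg l i e = l[i] :: seg l (i+1) e := by
  unfold seg
  rw [List.drop_eq_getElem_cons h]
  have : e - i = (e - (i+1)) + 1 := by omega
  rw [this, List.take_succ_cons]

theorem seg_trans {l : List Char} {a b c : Nat} (h1 : a ≤ b) (h2 : b ≤ c) :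
    seg l a c = seg l a b ++ seg l b c := by
  unfold seg
  rw [← List.take_append_drop (b - a) ((l.drop a).take (c - a))]
  congr 1
  · rw [List.take_take]; congr 1; omega
  · rw [List.drop_take, List.drop_drop]
    have e1 : c - a - (b - a) = c - b := by omega
    have e2 : a + (b - a) = b := by omega
    rw [e1, e2]

theorem seg_snoc {l : List Char} {i e : Nat} (h : e < l.length) (h2 : i ≤ e) :
    seg l i (e+1) = seg l i e ++ [l[e]] := by
  rw [seg_trans h2 (by omega), seg_cons h (by omega), seg_self]

-- stringEnd at the canonical fuel sql.length + 1 (the fuel emitLoop passes)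

theorem stringEnd_eq_none {sql : List Char} {qc : Char} {j : Nat}
    (h : findFrom sql qc j = none) (f : Nat) : stringEnd sql qc f j = none := by
  cases f <;> simp [stringEnd, h]

theorem stringEnd_eq_close {sql : List Char} {qc : Char} {j cq : Nat}
    (h1 : findFrom sql qc j = some cq) (h2 : findFromTo sql '\\' j cq = none) :
    stringEnd sql qc (sql.length + 1) j = some (cq + 1) := by
  simp [stringEnd, h1, h2]

theorem stringEnd_eq_step {sql : List Char} {qc : Char} {j cq cb : Nat}
    (h1 : findFrom sql qc j = some cq) (h2 : findFromTo sql '\\' j cq = some cb) :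
    stringEnd sql qc (sql.length + 1) j = stringEnd sql qc (sql.length + 1) (cb + 2) := by
  have hb := findFromTo_bounds h2
  simp only [stringEnd, h1, h2]
  exact bumpS sql qc (by omega)

theorem strRun (sql : List Char) (qc : Char) {k : Nat} (hk : k ≤ sql.length)
    {j : Nat} (hjk : j ≤ k)
    (hclean : ∀ m, j ≤ m → m < k → sql[m]? ≠ some qc ∧ sql[m]? ≠ some '\\')
    (current : List Char) (counter : Nat) (result : List Char) (map : PySem.Dict String String) :
    protectA_loop sql (sql.length + 1) j false false true (some qc) current counter result map =
    protectA_loop sql (sql.length + 1) k false false true (some qc) (current ++ seg sql j k) counter result map := by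
  by_cases hjk2 : j = k
  · subst hjk2; simp [seg_self]
  · have hj : j < k := lt_of_le_of_ne hjk hjk2
    have hjl : j < sql.length := by omega
    have hns := hclean j le_rfl hj
    rw [List.getElem?_eq_getElem hjl] at hns
    have h1 : sql[j] ≠ qc := by simpa using hns.1
    have h2 : sql[j] ≠ '\\' := by simpa using hns.2
    conv_lhs => rw [protectA_loop]
    simp only [dif_pos hjl, Bool.false_eq_true, if_false,
      h2, false_and, dite_false, Option.some.injEq, h1, if_false]
    rw [bumpA sql (by omega)]
    rw [strRun sql qc hk (by omega)
      (fun m hm1 hm2 => hclean m (by omega) hm2) (current ++ [sql[j]]) counter result map]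
    rw [seg_cons hjl hj]
    simp
termination_by k - j

theorem strScan (sql : List Char) (qc : Char) (hqc : qc ≠ '\\')
    {j : Nat} (hj : j ≤ sql.length)
    (current : List Char) (counter : Nat) (result : List Char) (map : PySem.Dict String String) :
    protectA_loop sql (sql.length + 1) j false false true (some qc) current counter result map =
    match stringEnd sql qc (sql.length + 1) j with
    | none => (result, map)
    | some e =>
      let content := current ++ seg sql j e
      let inner := (content.drop 1).dropLast
      if '\\' ∈ inner then
        protectA_loop sql (sql.length + 1) e false false false (some qc) [] (counter+1)
          (result ++ [qc] ++ ("___BSTR" ++ Nat.repr counter ++ "___").toList ++ [qc])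
          (PySem.Dict.insert map ("___BSTR" ++ Nat.repr counter ++ "___") (String.ofList inner))
      else
        protectA_loop sql (sql.length + 1) e false false false (some qc) [] counter (result ++ content) map := by
  cases hq : findFrom sql qc j with
  | none =>
    rw [stringEnd_eq_none hq]
    cases hb : findFromTo sql '\\' j sql.length with
    | none =>
      have hclean : ∀ m, j ≤ m → m < sql.length → sql[m]? ≠ some qc ∧ sql[m]? ≠ some '\\' :=
        fun m hm1 hm2 => ⟨findFrom_eq_none_iff.mp hq m hm1, findFromTo_eq_none hb m hm1 hm2⟩
      rw [strRun sql qc le_rfl hj hclean current counter result map]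
      rw [protectA_loop]
      simp
    | some cb =>
      obtain ⟨hb1, hb2, hb3⟩ := findFromTo_bounds hb
      have hsp := findFromTo_spec hb
      have hcb : sql[cb] = '\\' := by
        have := hsp.1; rwa [List.getElem?_eq_getElem hb3, Option.some.injEq] at this
      have hclean : ∀ m, j ≤ m → m < cb → sql[m]? ≠ some qc ∧ sql[m]? ≠ some '\\' :=
        fun m hm1 hm2 => ⟨findFrom_eq_none_iff.mp hq m hm1, hsp.2 m hm1 hm2⟩
      rw [strRun sql qc (k := cb) (by omega) hb1 hclean current counter result map]
      by_cases hcb1 : cb + 1 < sql.length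
      · conv_lhs => rw [protectA_loop]
        simp only [dif_pos hb3, Bool.false_eq_true, if_false, hcb, hcb1, and_true,
          dite_true]
        have hnone2 : findFrom sql qc (cb+2) = none := by
          rw [findFrom_eq_none_iff] at hq ⊢
          exact fun m hm => hq m (by omega)
        rw [bumpA sql (by omega)]
        have ih := strScan sql qc hqc (j := cb+2) (by omega)
          (current ++ seg sql j cb ++ ['\\', sql[cb+1]]) counter result map
        rw [stringEnd_eq_none hnone2] at ih
        exact ih
      · have hcbl : cb + 1 = sql.length := by omega
        conv_lhs => rw [protectA_loop]
        simp only [dif_pos hb3, Bool.false_eq_true, if_false, hcb, hcb1, and_false,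
          dite_false, Option.some.injEq]
        rw [if_neg (by simp [hqc.symm] : ¬ ('\\' : Char) = qc)]
        rw [bumpA sql (by omega)]
        conv_lhs => rw [protectA_loop]
        simp [hcbl]
  | some cq =>
    obtain ⟨hq1, hq2⟩ := findFrom_bounds hq
    have hqs := findFrom_spec hq
    have hcq : sql[cq] = qc := by
      have := hqs.1; rwa [List.getElem?_eq_getElem hq2, Option.some.injEq] at this
    cases hb : findFromTo sql '\\' j cq with
    | none =>
      rw [stringEnd_eq_close hq hb]
      have hclean : ∀ m, j ≤ m → m < cq → sql[m]? ≠ some qc ∧ sql[m]? ≠ some '\\' :=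
        fun m hm1 hm2 => ⟨hqs.2 m hm1 hm2, findFromTo_eq_none hb m hm1 hm2⟩
      rw [strRun sql qc (k := cq) (le_of_lt hq2) hq1 hclean current counter result map]
      conv_lhs => rw [protectA_loop]
      simp only [dif_pos hq2, Bool.false_eq_true, if_false, hcq, hqc, false_and,
        dite_false, if_true]
      rw [bumpA sql (by omega), bumpA sql (by omega)]
      rw [seg_snoc hq2 hq1, hcq]
      simp [List.append_assoc]
    | some cb =>
      rw [stringEnd_eq_step hq hb]
      obtain ⟨hb1, hb2, hb3⟩ := findFromTo_bounds hb
      have hsp := findFromTo_spec hb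
      have hcb : sql[cb] = '\\' := by
        have := hsp.1; rwa [List.getElem?_eq_getElem hb3, Option.some.injEq] at this
      have hclean : ∀ m, j ≤ m → m < cb → sql[m]? ≠ some qc ∧ sql[m]? ≠ some '\\' :=
        fun m hm1 hm2 => ⟨hqs.2 m hm1 (by omega), hsp.2 m hm1 hm2⟩
      rw [strRun sql qc (k := cb) (by omega) hb1 hclean current counter result map]
      have hcb1 : cb + 1 < sql.length := by omega
      conv_lhs => rw [protectA_loop]
      simp only [dif_pos hb3, Bool.false_eq_true, if_false, hcb, hcb1, and_true,
        dite_true]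
      rw [bumpA sql (by omega)]
      rw [strScan sql qc hqc (j := cb+2) (by omega)
        (current ++ seg sql j cb ++ ['\\', sql[cb+1]]) counter result map]
      cases hse : stringEnd sql qc (sql.length + 1) (cb+2) with
      | none => rfl
      | some e =>
        obtain ⟨he1, he2⟩ := stringEnd_bounds hse
        simp only
        have hseg : current ++ seg sql j cb ++ ['\\', sql[cb+1]] ++ seg sql (cb+2) e
            = current ++ seg sql j e := by
          rw [seg_trans (a := j) (b := cb+2) (c := e) (by omega) (by omega),
              seg_trans (a := j) (b := cb) (c := cb+2) hb1 (by omega)]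
          have h5 : seg sql cb (cb+2) = ['\\', sql[cb+1]] := by
            rw [seg_cons hb3 (by omega), seg_cons hcb1 (by omega), seg_self, hcb]
          rw [h5]
          simp
        rw [hseg]
        rw [if_pos trivial]
termination_by sql.length - j

theorem lineRun (sql : List Char) (qc : Option Char) (current : List Char) (counter : Nat)
    {j : Nat} (hj : j ≤ sql.length) (result : List Char) (map : PySem.Dict String String) :
    protectA_loop sql (sql.length + 1) j true false false qc current counter result map =
    match findFrom sql '\n' j with
    | none => (result ++ seg sql j sql.length, map)
    | some k => protectA_loop sql (sql.length + 1) (k+1) false false false qc current counter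
        (result ++ seg sql j (k+1)) map := by
  by_cases hlt : j < sql.length
  · have hs1 : seg sql j (j+1) = [sql[j]] := by
      rw [seg_cons hlt (by omega), seg_self]
    conv_lhs => rw [protectA_loop]
    rw [findFrom]
    simp only [dif_pos hlt, if_true]
    by_cases hnl : sql[j] = '\n'
    · rw [bumpA sql (by omega)]
      simp [hnl, hs1]
    · simp only [hnl, ite_false]
      rw [bumpA sql (by omega)]
      rw [lineRun sql qc current counter (j := j+1) (by omega) (result ++ [sql[j]]) map]
      cases hk : findFrom sql '\n' (j+1) with
      | none =>
        simp only
        rw [seg_cons hlt (by omega)]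
        simp
      | some k =>
        have := findFrom_bounds hk
        simp only
        rw [seg_cons (e := k+1) hlt (by omega)]
        simp
  · have hj' : j = sql.length := by omega
    rw [protectA_loop, findFrom]
    simp [hj', seg_self]
termination_by sql.length - j

theorem blockRun (sql : List Char) (qc : Option Char) (current : List Char) (counter : Nat)
    {j : Nat} (hj : j ≤ sql.length) (result : List Char) (map : PySem.Dict String String) :
    protectA_loop sql (sql.length + 1) j false true false qc current counter result map =
    match findPairFrom sql '*' '/' j with
    | none => (result ++ seg sql j sql.length, map)
    | some k => protectA_loop sql (sql.length + 1) (k+1) false false false qc current counter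
        (result ++ seg sql j (k+1)) map := by
  by_cases hlt : j < sql.length
  · have hs1 : seg sql j (j+1) = [sql[j]] := by
      rw [seg_cons hlt (by omega), seg_self]
    conv_lhs => rw [protectA_loop]
    rw [findPairFrom]
    simp only [dif_pos hlt, Bool.false_eq_true, if_false, if_true]
    by_cases hp : j + 1 < sql.length
    · simp only [dif_pos hp]
      by_cases hm : sql[j] = '*' ∧ sql[j+1] = '/'
      · have hA : sql[j] = '*' ∧ sql[j+1]? = some '/' :=
          ⟨hm.1, by rw [List.getElem?_eq_getElem hp, hm.2]⟩
        rw [if_pos hA, if_pos hm]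
        rw [bumpA sql (by omega)]
        simp [hs1]
      · have hA : ¬ (sql[j] = '*' ∧ sql[j+1]? = some '/') := by
          intro h; exact hm ⟨h.1, by
            have := h.2; rwa [List.getElem?_eq_getElem hp, Option.some.injEq] at this⟩
        rw [if_neg hA, if_neg hm]
        rw [bumpA sql (by omega)]
        rw [blockRun sql qc current counter (j := j+1) (by omega) (result ++ [sql[j]]) map]
        cases hk : findPairFrom sql '*' '/' (j+1) with
        | none =>
          simp only
          rw [seg_cons hlt (by omega)]
          simp
        | some k =>
          have := findPairFrom_bounds hk
          simp only
          rw [seg_cons (e := k+1) hlt (by omega)]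
          simp
    · have hA : ¬ (sql[j] = '*' ∧ sql[j+1]? = some '/') := by
        intro h
        obtain ⟨hh, -⟩ := List.getElem?_eq_some_iff.mp h.2
        exact hp hh
      rw [if_neg hA, dif_neg hp]
      rw [bumpA sql (by omega)]
      conv_lhs => rw [protectA_loop]
      simp only [dif_neg hp]
      have hsl : seg sql j sql.length = [sql[j]] := by
        rw [← hs1]; congr 1; omega
      rw [hsl]
  · have hj' : j = sql.length := by omega
    rw [protectA_loop, findPairFrom]
    have h2 : ¬ (j + 1 < sql.length) := by omega
    simp [hj', seg_self]
termination_by sql.length - j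

theorem mainEq (sql : List Char) {i : Nat} (_hi : i ≤ sql.length)
    (qc : Option Char) (current : List Char) (counter : Nat)
    (result : List Char) (map : PySem.Dict String String) :
    protectA_loop sql (sql.length + 1) i false false false qc current counter result map =
    emitLoop sql (sql.length + 1) i result map counter := by
  by_cases hlt : i < sql.length
  · conv_lhs => rw [protectA_loop]
    conv_rhs => rw [emitLoop]
    simp only [dif_pos hlt, Bool.false_eq_true, if_false]
    by_cases h1 : sql[i] = '\'' ∨ sql[i] = '"'
    · rw [if_pos h1, if_pos h1]
      have hqc : sql[i] ≠ '\\' := by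
        rcases h1 with h | h <;> simp [h]
      rw [bumpA sql (by omega)]
      rw [strScan sql (sql[i]) hqc (j := i+1) (by omega) [sql[i]] counter result map]
      cases hse : stringEnd sql (sql[i]) (sql.length + 1) (i+1) with
      | none => simp only
      | some e =>
        obtain ⟨he1, he2⟩ := stringEnd_bounds hse
        simp only
        have hcont : (sql[i] :: seg sql (i+1) e) = seg sql i e :=
          (seg_cons hlt (by omega)).symm
        rw [show ([sql[i]] ++ seg sql (i+1) e) = seg sql i e from hcont]
        split
        · rw [bumpB sql (by omega)]
          exact mainEq sql (by omega) (some sql[i]) [] (counter+1) _ _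
        · rw [bumpB sql (by omega)]
          exact mainEq sql (by omega) (some sql[i]) [] counter _ _
    · rw [if_neg h1, if_neg h1]
      by_cases h2 : sql[i] = '-' ∧ sql[i+1]? = some '-'
      · rw [if_pos h2, if_pos h2]
        rw [bumpA sql (by omega)]
        rw [lineRun sql qc current counter (j := i+1) (by omega) (result ++ [sql[i]]) map]
        cases hk : findFrom sql '\n' (i+1) with
        | none =>
          simp only
          rw [seg_cons hlt hlt]
          rw [bumpB sql (by omega)]
          conv_rhs => rw [emitLoop]
          simp
        | some k =>
          obtain ⟨hk1, hk2⟩ := findFrom_bounds hk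
          simp only
          rw [bumpB sql (by omega)]
          rw [seg_cons (e := k+1) hlt (by omega), mainEq sql (by omega) qc current counter _ map]
          simp
      · rw [if_neg h2, if_neg h2]
        by_cases h3 : sql[i] = '/' ∧ sql[i+1]? = some '*'
        · rw [if_pos h3, if_pos h3]
          rw [bumpA sql (by omega)]
          rw [blockRun sql qc current counter (j := i+1) (by omega) (result ++ [sql[i]]) map]
          cases hk : findPairFrom sql '*' '/' (i+1) with
          | none =>
            simp only
            rw [seg_cons hlt hlt]
            rw [bumpB sql (by omega)]
            conv_rhs => rw [emitLoop]
            simp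
          | some k =>
            obtain ⟨hk1, hk2⟩ := findPairFrom_bounds hk
            simp only
            rw [bumpB sql (by omega)]
            rw [seg_cons (e := k+1) hlt (by omega), mainEq sql (by omega) qc current counter _ map]
            simp
        · rw [if_neg h3, if_neg h3]
          rw [bumpA sql (by omega), bumpB sql (by omega)]
          exact mainEq sql (by omega) qc current counter _ map
  · rw [protectA_loop, emitLoop]
    simp [hlt]
termination_by sql.length - i

-- ===== VERDICT (by name: the statement is the Claim_ definition above) =====
theorem protect_backslash_strings_py_spec : Claim_equal_protect_backslash_strings_py := by
  intro sql _
  unfold Spec_protect_backslash_strings_py protect_backslash_strings_py protect_backslash_strings_py_alt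
  rw [mainEq sql.toList (Nat.zero_le _) none [] 0 [] PySem.Dict.empty]
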